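-- pv_equiv track=rewrite | github.com/JLORep/ProjectTrench | customer_focused_retrospective.py | _determine_customer_components
-- ===== SOURCE A (Python) =====
-- from typing import Dict, List, Any, Tuple, Optional
--
-- def _determine_customer_components(files: List[str]) -> List[str]:
--     """Determine customer-friendly component names"""
--     components = set()
--
--     component_mapping = {
--         'dashboard': 'Dashboard',
--         'trading': 'Trading System',
--         'signal': 'Signal Detection',
--         'sniper': 'Sniper Bot',
--         'webhook': 'Notifications',
--         'discord': 'Discord Integration',
--         'telegram': 'Telegram Integration',
--         'api': 'API System',
--         'ui': 'User Interface',
--         'chart': 'Charts & Graphs',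
--         'data': 'Data Processing',
--         'security': 'Security System',
--         'auth': 'Authentication'
--     }
--
--     for file in files:
--         file_lower = file.lower()
--         for keyword, component in component_mapping.items():
--             if keyword in file_lower:
--                 components.add(component)
--
--     return sorted(list(components))[:5]
-- ===== SOURCE B (Python) =====
-- from typing import List
--
-- def _determine_customer_components(files: List[str]) -> List[str]:
--     """Determine customer-friendly component names"""
--     component_mapping = {
--         'dashboard': 'Dashboard',
--         'trading': 'Trading System',
--         'signal': 'Signal Detection',
--         'sniper': 'Sniper Bot',
--         'webhook': 'Notifications',
--         'discord': 'Discord Integration',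
--         'telegram': 'Telegram Integration',
--         'api': 'API System',
--         'ui': 'User Interface',
--         'chart': 'Charts & Graphs',
--         'data': 'Data Processing',
--         'security': 'Security System',
--         'auth': 'Authentication'
--     }
--     lows = [f.lower() for f in files]
--     result = []
--     # walk the keywords in order of their component name; stop as soon as 5 are found
--     for keyword, component in sorted(component_mapping.items(), key=lambda kv: kv[1]):
--         if any(keyword in low for low in lows):
--             result.append(component)
--             if len(result) == 5:
--                 break
--     return result
-- ===== Notes on version B (the rewrite author's own statement) =====
-- stated objective: alternative
-- what changed: Inverted the loop nesting (keywords outer, files inner) and replaced build-a-set-then-sort-then-slice by walking the keyword/component pairs sorted once by component name, collecting matches and breaking as soon as 5 components are found.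
import Mathlib
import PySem

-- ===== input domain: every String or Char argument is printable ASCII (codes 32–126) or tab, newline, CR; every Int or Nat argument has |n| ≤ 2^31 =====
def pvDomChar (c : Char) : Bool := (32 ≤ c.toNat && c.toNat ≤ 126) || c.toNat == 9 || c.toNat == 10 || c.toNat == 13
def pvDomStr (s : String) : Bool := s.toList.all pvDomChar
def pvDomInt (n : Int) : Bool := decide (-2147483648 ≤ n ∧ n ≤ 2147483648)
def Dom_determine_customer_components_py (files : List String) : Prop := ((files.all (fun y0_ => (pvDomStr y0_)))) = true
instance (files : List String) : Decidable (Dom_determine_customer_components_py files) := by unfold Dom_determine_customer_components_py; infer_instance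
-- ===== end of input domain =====

-- B walks the keyword/component pairs sorted once by component name, collecting matches and
-- breaking at 5, instead of building a set over all files and then sorting and slicing it
-- (alternative decomposition; same cost).

-- the component_mapping dict literal both Pythons contain
def pvMapL : List (String × String) :=
  [("dashboard", "Dashboard"),
   ("trading", "Trading System"),
   ("signal", "Signal Detection"),
   ("sniper", "Sniper Bot"),
   ("webhook", "Notifications"),
   ("discord", "Discord Integration"),
   ("telegram", "Telegram Integration"),
   ("api", "API System"),
   ("ui", "User Interface"),
   ("chart", "Charts & Graphs"),
   ("data", "Data Processing"),
   ("security", "Security System"),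
   ("auth", "Authentication")]

-- ===== PORT A =====
def determine_customer_components_py (files : List String) : List String :=
  let component_mapping := PySem.Dict.ofList pvMapL
  let components : PySem.Set String :=
    files.foldl (fun components file =>
      let file_lower := PySem.Str.lower file
      component_mapping.items.foldl (fun components kc =>
        if PySem.Str.isIn kc.1 file_lower then PySem.Set.add components kc.2 else components)
        components)
      PySem.Set.empty
  PySem.List.slice (PySem.List.sorted components (fun x => x) false) none (some 5)

-- ===== PORT B =====
-- the 'for keyword, component in sorted(...): … append … break at 5' loop of Source B
def pvGoB (m : String → Bool) : List (String × String) → List String → List String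
  | [], result => result
  | (keyword, component) :: rest, result =>
    if m keyword then
      let result' := result ++ [component]
      if result'.length == 5 then result' else pvGoB m rest result'
    else pvGoB m rest result

def determine_customer_components_py_alt (files : List String) : List String :=
  let component_mapping := PySem.Dict.ofList pvMapL
  let lows := files.map PySem.Str.lower
  pvGoB (fun keyword => lows.any (fun low => PySem.Str.isIn keyword low))
    (PySem.List.sorted component_mapping.items (fun kv => kv.2) false) []

-- ===== PRECONDITION & SPEC =====
def Spec_determine_customer_components_py (files : List String) (out : List String) : Prop := out = determine_customer_components_py_alt files
instance (files : List String) (out : List String) : Decidable (Spec_determine_customer_components_py files out) := by unfold Spec_determine_customer_components_py; infer_instance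

-- ===== CLAIM (what is proved, stated in full; the proofs are below) =====
def Claim_equal_determine_customer_components_py : Prop := ∀ (files : List String), Dom_determine_customer_components_py files → Spec_determine_customer_components_py files (determine_customer_components_py files)

-- ===== LEMMAS AND PROOFS =====

theorem pvGoB_eq_take (m : String → Bool) (pairs : List (String × String)) :
    ∀ result : List String, result.length < 5 →
      pvGoB m pairs result =
        result ++ ((pairs.filter (fun p => m p.1)).map Prod.snd).take (5 - result.length) := by
  induction pairs with
  | nil => intro result _; simp [pvGoB]
  | cons kc rest ih =>
    intro result hlt
    obtain ⟨k, c⟩ := kc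
    by_cases hm : m k
    · have hgo : pvGoB m ((k, c) :: rest) result =
        (if ((result ++ [c]).length == 5) = true then result ++ [c]
         else pvGoB m rest (result ++ [c])) := by
        simp [pvGoB, hm]
      rw [hgo]
      by_cases h5 : result.length + 1 = 5
      · rw [if_pos (by simp [h5])]
        have h1 : 5 - result.length = 1 := by omega
        simp [hm, h1]
      · have hlen : (result ++ [c]).length < 5 := by simp; omega
        rw [if_neg (by simp; omega), ih _ hlen]
        have h1 : 5 - result.length = (5 - (result.length + 1)) + 1 := by omega
        simp [List.filter_cons, hm, h1]
    · have hgo : pvGoB m ((k, c) :: rest) result = pvGoB m rest result := by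
        simp [pvGoB, hm]
      rw [hgo, ih _ hlt]
      simp [List.filter_cons, hm]

-- membership in A's inner (per-file) fold over the mapping items
theorem pvMemInner (fl : String) (L : List (String × String)) :
    ∀ (s : PySem.Set String) (x : String),
      x ∈ L.foldl (fun comps kc =>
          if PySem.Str.isIn kc.1 fl then PySem.Set.add comps kc.2 else comps) s ↔
        x ∈ s ∨ ∃ p ∈ L, PySem.Str.isIn p.1 fl = true ∧ x = p.2 := by
  induction L with
  | nil => intro s x; simp
  | cons q rest ih =>
    intro s x
    simp only [List.foldl_cons]
    by_cases hq : PySem.Str.isIn q.1 fl = true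
    · rw [if_pos hq, ih]
      simp only [PySem.Set.mem_add, List.mem_cons]
      constructor
      · rintro (⟨h | h⟩ | ⟨p, hp, h1, h2⟩)
        · exact Or.inl h
        · exact Or.inr ⟨q, Or.inl rfl, hq, h⟩
        · exact Or.inr ⟨p, Or.inr hp, h1, h2⟩
      · rintro (h | ⟨p, hp | hp, h1, h2⟩)
        · exact Or.inl (Or.inl h)
        · exact Or.inl (Or.inr (hp ▸ h2))
        · exact Or.inr ⟨p, hp, h1, h2⟩
    · rw [if_neg hq, ih]
      constructor
      · rintro (h | ⟨p, hp, h1, h2⟩)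
        · exact Or.inl h
        · exact Or.inr ⟨p, List.mem_cons_of_mem _ hp, h1, h2⟩
      · rintro (h | ⟨p, hp, h1, h2⟩)
        · exact Or.inl h
        · rcases List.mem_cons.mp hp with rfl | hp
          · exact absurd h1 hq
          · exact Or.inr ⟨p, hp, h1, h2⟩

-- membership in A's outer fold over the files
theorem pvMemOuter (L : List (String × String)) (files : List String) :
    ∀ (s : PySem.Set String) (x : String),
      x ∈ files.foldl (fun comps file =>
          L.foldl (fun comps kc =>
            if PySem.Str.isIn kc.1 (PySem.Str.lower file) then PySem.Set.add comps kc.2 else comps)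
            comps) s ↔
        x ∈ s ∨ ∃ f ∈ files, ∃ p ∈ L,
          PySem.Str.isIn p.1 (PySem.Str.lower f) = true ∧ x = p.2 := by
  induction files with
  | nil => intro s x; simp
  | cons f rest ih =>
    intro s x
    simp only [List.foldl_cons]
    rw [ih]
    constructor
    · rintro (h | ⟨g, hg, p, hp, h1, h2⟩)
      · rcases (pvMemInner (PySem.Str.lower f) L s x).mp h with h | ⟨p, hp, h1, h2⟩
        · exact Or.inl h
        · exact Or.inr ⟨f, List.mem_cons_self, p, hp, h1, h2⟩
      · exact Or.inr ⟨g, List.mem_cons_of_mem _ hg, p, hp, h1, h2⟩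
    · rintro (h | ⟨g, hg, p, hp, h1, h2⟩)
      · exact Or.inl ((pvMemInner (PySem.Str.lower f) L s x).mpr (Or.inl h))
      · rcases List.mem_cons.mp hg with rfl | hg
        · exact Or.inl ((pvMemInner (PySem.Str.lower g) L s x).mpr (Or.inr ⟨p, hp, h1, h2⟩))
        · exact Or.inr ⟨g, hg, p, hp, h1, h2⟩

-- A's accumulated set stays Nodup
theorem pvNodupFold (L : List (String × String)) (files : List String) :
    ∀ (s : PySem.Set String), s.Nodup →
      (files.foldl (fun comps file =>
          L.foldl (fun comps kc =>
            if PySem.Str.isIn kc.1 (PySem.Str.lower file) then PySem.Set.add comps kc.2 else comps)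
            comps) s).Nodup := by
  have inner : ∀ (fl : String) (s : PySem.Set String), s.Nodup →
      (L.foldl (fun comps kc =>
        if PySem.Str.isIn kc.1 fl then PySem.Set.add comps kc.2 else comps) s).Nodup := by
    intro fl
    induction L with
    | nil => intro s hs; exact hs
    | cons q rest ih =>
      intro s hs
      simp only [List.foldl_cons]
      split_ifs with hq
      · exact ih _ (PySem.Set.nodup_add _ _ hs)
      · exact ih _ hs
  induction files with
  | nil => intro s hs; exact hs
  | cons f rest ih =>
    intro s hs
    simp only [List.foldl_cons]
    exact ih _ (inner _ _ hs)

-- ===== VERDICT (by name: the statement is the Claim_ definition above) =====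
theorem determine_customer_components_py_spec : Claim_equal_determine_customer_components_py := by
  intro files _
  unfold Spec_determine_customer_components_py
  unfold determine_customer_components_py determine_customer_components_py_alt
  simp only []
  set m : String → Bool :=
    fun keyword => (files.map PySem.Str.lower).any (fun low => PySem.Str.isIn keyword low) with hm
  set L : List (String × String) := (PySem.Dict.ofList pvMapL).items with hL
  set P : List (String × String) := PySem.List.sorted L (fun kv => kv.2) false with hP
  set S : PySem.Set String :=
    files.foldl (fun components file =>
      L.foldl (fun components kc =>
        if PySem.Str.isIn kc.1 (PySem.Str.lower file) then PySem.Set.add components kc.2 else components)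
        components) PySem.Set.empty with hS
  set T : List String := (P.filter (fun p => m p.1)).map Prod.snd with hT
  -- B's loop is take 5 of the filtered sorted pairs
  rw [pvGoB_eq_take m P [] (by simp)]
  simp only [List.nil_append, List.length_nil, Nat.sub_zero]
  -- the snd components of L are pairwise distinct
  have hLlit : L = pvMapL := by decide
  have hsndnodupL : (L.map Prod.snd).Nodup := by rw [hLlit]; decide
  -- P is a permutation of L
  have hPL : P.Perm L := PySem.List.sorted_perm L (fun kv => kv.2) false
  have hsndnodupP : (P.map Prod.snd).Nodup := ((hPL.map Prod.snd).nodup_iff).mpr hsndnodupL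
  -- P is strictly increasing in snd
  have hPle : P.Pairwise (fun a b => a.2 ≤ b.2) :=
    PySem.List.sorted_pairwise L (fun kv => kv.2)
  have hPne : P.Pairwise (fun a b => a.2 ≠ b.2) := (List.pairwise_map).mp hsndnodupP
  have hPlt : P.Pairwise (fun a b => a.2 < b.2) :=
    (hPle.and hPne).imp (fun h => lt_of_le_of_ne h.1 h.2)
  -- T is strictly increasing
  have hTlt : T.Pairwise (· < ·) := by
    rw [hT, List.pairwise_map]
    exact hPlt.filter _
  have hTnodup : T.Nodup := hTlt.imp (fun h => ne_of_lt h)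
  -- S is Nodup
  have hSnodup : S.Nodup := pvNodupFold L files PySem.Set.empty (by simp [PySem.Set.empty])
  -- same members
  have hmem : ∀ x, x ∈ T ↔ x ∈ S := by
    intro x
    rw [hS, pvMemOuter]
    simp only [PySem.Set.empty, List.not_mem_nil, false_or]
    rw [hT]
    simp only [List.mem_map, List.mem_filter]
    constructor
    · rintro ⟨p, ⟨hpP, hmp⟩, h2⟩
      rw [hm] at hmp
      simp only [List.any_eq_true, List.mem_map] at hmp
      obtain ⟨low, ⟨f, hf, rfl⟩, hin⟩ := hmp
      exact ⟨f, hf, p, (PySem.List.mem_sorted L (fun kv => kv.2) false p).mp hpP, hin, h2.symm⟩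
    · rintro ⟨f, hf, p, hp, h1, h2⟩
      refine ⟨p, ⟨(PySem.List.mem_sorted L (fun kv => kv.2) false p).mpr hp, ?_⟩, h2.symm⟩
      rw [hm]
      simp only [List.any_eq_true, List.mem_map]
      exact ⟨PySem.Str.lower f, ⟨f, hf, rfl⟩, h1⟩
  -- hence sorted S = T
  have hperm : T.Perm S := (List.perm_ext_iff_of_nodup hTnodup hSnodup).mpr hmem
  have hsorted : PySem.List.sorted S (fun x => x) false = T :=
    PySem.List.sorted_eq_of_perm_of_pairwise_lt S T (fun x => x) hperm hTlt
  rw [hsorted, show ((5 : Int) = ((5 : Nat) : Int)) by norm_num, PySem.List.slice_to_natCast]
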